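-- pv_equiv track=rewrite | github.com/jonatan5524/own-git | ugit/diff.py | iter_changed_files
-- ===== SOURCE A (Python) =====
-- from collections import defaultdict
-- from typing import Dict, Iterator, List, Tuple
--
-- def compare_trees(*trees: Dict[str, str]) -> Iterator[Tuple[str, str]]:
--     entries = defaultdict(lambda: [None] * len(trees))
--
--     for index, tree in enumerate(trees):
--         for path, object_id in tree.items():
--             entries[path][index] = object_id
--
--     for path, object_ids in entries.items():
--         yield (path, *object_ids)
--
-- def iter_changed_files(tree_from: str, tree_to: str) -> Iterator[Tuple[str, str]]:
--     for path, object_from, object_to in compare_trees(tree_from, tree_to):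
--         if object_from != object_to:
--             action = (
--                 "new file" if not object_from else
--                 "deleted" if not object_to else
--                 "modified"
--             )
--
--             yield path, action
-- ===== SOURCE B (Python) =====
-- def iter_changed_files(tree_from, tree_to):
--     # pass 1: every path of tree_from, compared against tree_to
--     for path, object_from in tree_from.items():
--         object_to = tree_to.get(path)
--         if object_from != object_to:
--             yield path, (
--                 "new file" if not object_from else
--                 "deleted" if not object_to else
--                 "modified"
--             )
--     # pass 2: paths only in tree_to are always new files
--     for path in tree_to:
--         if path not in tree_from:
--             yield path, "new file"
-- ===== Notes on version B (the rewrite author's own statement) =====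
-- stated objective: simpler
-- what changed: A builds a defaultdict merge table of [from,to] object-id pairs (compare_trees) and then scans it; B drops the merged structure entirely and makes two plain passes: over tree_from comparing each path against tree_to.get(path), then over tree_to yielding 'new file' for paths absent from tree_from.
import Mathlib
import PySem

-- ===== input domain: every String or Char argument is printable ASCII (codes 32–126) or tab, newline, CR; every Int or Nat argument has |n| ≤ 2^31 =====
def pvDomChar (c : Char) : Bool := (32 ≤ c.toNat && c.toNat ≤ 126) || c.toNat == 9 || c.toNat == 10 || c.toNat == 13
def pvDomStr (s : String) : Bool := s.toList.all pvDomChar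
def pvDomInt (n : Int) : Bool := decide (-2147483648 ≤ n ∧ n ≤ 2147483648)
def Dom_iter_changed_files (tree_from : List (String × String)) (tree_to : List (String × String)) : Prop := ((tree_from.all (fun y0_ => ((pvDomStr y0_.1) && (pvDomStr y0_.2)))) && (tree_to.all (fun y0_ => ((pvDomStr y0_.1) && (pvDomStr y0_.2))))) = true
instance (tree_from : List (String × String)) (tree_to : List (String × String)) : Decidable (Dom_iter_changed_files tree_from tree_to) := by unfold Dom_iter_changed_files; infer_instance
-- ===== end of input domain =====

-- B replaces A's defaultdict merge table (compare_trees) by two plain passes — over tree_from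
-- comparing against tree_to, then over tree_to's paths missing from tree_from — so no merged
-- structure is built; objective: simpler. Equivalence is about the returned list of pairs
-- (both Pythons are generators, materialised as lists).

-- Python truthiness of an Optional[str]: 'not x' is true for None and for ""
def pvFalsy (o : Option String) : Bool := o.getD "" == ""

-- ===== PORT A =====
def iter_changed_files (tree_from : List (String × String)) (tree_to : List (String × String)) : List (String × String) :=
  -- compare_trees inlined for two trees: entries = defaultdict(lambda: [None, None]);
  -- pass index 0 (tree_from) sets component 1, pass index 1 (tree_to) sets component 2
  let d1 : PySem.Dict String (Option String × Option String) :=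
    tree_from.foldl (fun d p => d.insert p.1 (some p.2, (d.getD p.1 (none, none)).2)) PySem.Dict.empty
  let d2 : PySem.Dict String (Option String × Option String) :=
    tree_to.foldl (fun d p => d.insert p.1 ((d.getD p.1 (none, none)).1, some p.2)) d1
  -- the generator loop: for path, object_from, object_to in entries.items(): …
  d2.items.foldl (fun acc e =>
    if e.2.1 != e.2.2 then
      acc ++ [(e.1, if pvFalsy e.2.1 then "new file" else if pvFalsy e.2.2 then "deleted" else "modified")]
    else acc) []

-- ===== PORT B =====
def iter_changed_files_alt (tree_from : List (String × String)) (tree_to : List (String × String)) : List (String × String) :=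
  -- pass 1: every path of tree_from, compared against tree_to.get(path)
  (tree_from.foldl (fun acc p =>
    if some p.2 != PySem.Dict.get? (PySem.Dict.mk tree_to) p.1 then
      acc ++ [(p.1,
        if p.2 == "" then "new file"
        else if pvFalsy (PySem.Dict.get? (PySem.Dict.mk tree_to) p.1) then "deleted"
        else "modified")]
    else acc) [])
  -- pass 2: paths only in tree_to are always new files
  ++ tree_to.foldl (fun acc p =>
    if !(PySem.Dict.contains (PySem.Dict.mk tree_from) p.1) then acc ++ [(p.1, "new file")] else acc) []

-- ===== PRECONDITION & SPEC =====
-- Pre_ excludes association lists with duplicate keys: the Python arguments are dicts,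
-- in which duplicate keys are unrepresentable, so no Python input is excluded.
def Pre_iter_changed_files (tree_from : List (String × String)) (tree_to : List (String × String)) : Prop :=
  (tree_from.map Prod.fst).Nodup ∧ (tree_to.map Prod.fst).Nodup
instance (tree_from : List (String × String)) (tree_to : List (String × String)) : Decidable (Pre_iter_changed_files tree_from tree_to) := by unfold Pre_iter_changed_files; infer_instance

def pvWitness_iter_changed_files : (List (String × String)) × (List (String × String)) :=
  ([("a", "1"), ("b", "2")], [("a", "3"), ("c", "4")])

def Spec_iter_changed_files (tree_from : List (String × String)) (tree_to : List (String × String)) (out : List (String × String)) : Prop := out = iter_changed_files_alt tree_from tree_to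
instance (tree_from : List (String × String)) (tree_to : List (String × String)) (out : List (String × String)) : Decidable (Spec_iter_changed_files tree_from tree_to out) := by unfold Spec_iter_changed_files; infer_instance

-- ===== CLAIM (what is proved, stated in full; the proofs are below) =====
def Claim_equal_iter_changed_files : Prop := ∀ (tree_from : List (String × String)) (tree_to : List (String × String)), Dom_iter_changed_files tree_from tree_to → Pre_iter_changed_files tree_from tree_to → Spec_iter_changed_files tree_from tree_to (iter_changed_files tree_from tree_to)

-- ===== LEMMAS AND PROOFS =====

-- pass 1 over fresh distinct keys: the entries dict is tree_from, each value tagged (some ·, none)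
lemma pass1_items (l : List (String × String)) (d : PySem.Dict String (Option String × Option String))
    (hdisj : ∀ p ∈ l, d.contains p.1 = false) (hl : (l.map Prod.fst).Nodup) :
    (l.foldl (fun d p => d.insert p.1 (some p.2, (d.getD p.1 (none, none)).2)) d).items
      = d.items ++ l.map (fun p => (p.1, ((some p.2 : Option String), (none : Option String)))) := by
  induction l generalizing d with
  | nil => simp
  | cons q rest ih =>
    have hq : d.contains q.1 = false := hdisj q (by simp)
    have hget : d.getD q.1 (none, none) = (none, none) := PySem.Dict.getD_of_not_contains d _ hq
    simp only [List.foldl_cons, hget]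
    rw [ih]
    · rw [PySem.Dict.items_insert_of_not_contains d _ hq]
      simp
    · intro p hp
      rw [PySem.Dict.contains_insert]
      have h1 : p.1 ≠ q.1 := by
        simp only [List.map_cons, List.nodup_cons] at hl
        intro h; exact hl.1 (h ▸ List.mem_map_of_mem hp)
      simp [h1, hdisj p (List.mem_cons_of_mem _ hp)]
    · simpa using hl.of_cons

-- pass 2 leaves keys it never touches alone
lemma pass2_get?_not_mem (l : List (String × String))
    (d : PySem.Dict String (Option String × Option String)) (k : String)
    (hk : k ∉ l.map Prod.fst) :
    (l.foldl (fun d p => d.insert p.1 ((d.getD p.1 (none, none)).1, some p.2)) d).get? k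
      = d.get? k := by
  induction l generalizing d with
  | nil => rfl
  | cons q rest ih =>
    simp only [List.map_cons, List.mem_cons, not_or] at hk
    simp only [List.foldl_cons]
    rw [ih _ hk.2, PySem.Dict.get?_insert_of_ne _ _ hk.1]

-- what pass 2 does to each key: it keeps the first component and writes tree_to's value
lemma pass2_get? (l : List (String × String)) (hl : (l.map Prod.fst).Nodup)
    (d : PySem.Dict String (Option String × Option String)) (k : String) :
    (l.foldl (fun d p => d.insert p.1 ((d.getD p.1 (none, none)).1, some p.2)) d).get? k
      = match (PySem.Dict.mk l : PySem.Dict String String).get? k with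
        | none => d.get? k
        | some w => some ((d.getD k (none, none)).1, some w) := by
  induction l generalizing d with
  | nil => rfl
  | cons q rest ih =>
    simp only [List.map_cons, List.nodup_cons] at hl
    simp only [List.foldl_cons]
    rw [PySem.Dict.get?_mk_cons]
    by_cases hqk : q.1 = k
    · subst hqk
      simp only [BEq.rfl, if_true]
      rw [pass2_get?_not_mem _ _ _ hl.1, PySem.Dict.get?_insert_self]
    · have : (q.1 == k) = false := by simp [hqk]
      rw [this]
      simp only [Bool.false_eq_true, if_false]
      rw [ih hl.2]
      cases hmk : (PySem.Dict.mk rest : PySem.Dict String String).get? k with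
      | none => simp [PySem.Dict.get?_insert_of_ne _ _ (Ne.symm hqk)]
      | some w => simp [PySem.Dict.getD_insert_of_ne _ _ _ (Ne.symm hqk)]

-- ===== VERDICT (by name: the statement is the Claim_ definition above) =====
theorem iter_changed_files_spec : Claim_equal_iter_changed_files := by
  intro tf tt _ hpre
  obtain ⟨h1, h2⟩ := hpre
  unfold Spec_iter_changed_files iter_changed_files iter_changed_files_alt
  -- name the two dicts
  have hd1 : (tf.foldl (fun d p => d.insert p.1 (some p.2, (d.getD p.1 (none, none)).2)) PySem.Dict.empty).items
      = tf.map (fun p => (p.1, ((some p.2 : Option String), (none : Option String)))) := by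
    simpa using pass1_items tf PySem.Dict.empty (by intro p _; simp) h1
  set d1 := tf.foldl (fun d p => d.insert p.1 (some p.2, (d.getD p.1 (none, none)).2))
      (PySem.Dict.empty : PySem.Dict String (Option String × Option String)) with hd1def
  set d2 := tt.foldl (fun d p => d.insert p.1 ((d.getD p.1 (none, none)).1, some p.2)) d1 with hd2def
  have hd1keys : d1.keys = tf.map Prod.fst := by
    simp [PySem.Dict.keys, hd1, List.map_map, Function.comp]
  have hd1nodup : d1.keys.Nodup := hd1keys ▸ h1
  have hd2keys : d2.keys = tf.map Prod.fst
      ++ (tt.map Prod.fst).filter (fun y => !(PySem.Set.contains (tf.map Prod.fst) y)) := by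
    rw [hd2def, PySem.Dict.keys_foldl_insert_key tt Prod.fst
      (fun d x => ((d.getD x.1 (none, none)).1, some x.2)) d1, hd1keys,
      PySem.Set.update_eq_append_filter, PySem.Set.ofList_eq_self_of_nodup _ h2]
  have hd2nodup : d2.keys.Nodup := by
    rw [hd2def]
    exact PySem.Dict.nodup_keys_foldl_insert_key tt Prod.fst _ d1 hd1nodup
  -- lookups in d2
  have hmkttkeys : (PySem.Dict.mk tt : PySem.Dict String String).keys.Nodup := by
    simpa [PySem.Dict.keys] using h2
  have hG : ∀ p ∈ tt, (PySem.Dict.mk tt : PySem.Dict String String).get? p.1 = some p.2 := by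
    intro p hp
    exact PySem.Dict.get?_of_mem_items _ hp hmkttkeys
  have hd2getTF : ∀ p ∈ tf, d2.getD p.1 (none, none)
      = (some p.2, (PySem.Dict.mk tt : PySem.Dict String String).get? p.1) := by
    intro p hp
    have hget1 : d1.get? p.1 = some (some p.2, none) :=
      PySem.Dict.get?_of_mem_items d1 (hd1 ▸ List.mem_map_of_mem hp) hd1nodup
    have hget2 : d2.get? p.1 = some (some p.2, (PySem.Dict.mk tt : PySem.Dict String String).get? p.1) := by
      rw [hd2def, pass2_get? tt h2]
      cases h : (PySem.Dict.mk tt : PySem.Dict String String).get? p.1 with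
      | none => simpa using hget1
      | some w => simp [PySem.Dict.getD_of_get?_eq_some _ _ hget1]
    exact PySem.Dict.getD_of_get?_eq_some _ _ hget2
  have hd2getTT : ∀ q ∈ tt, q.1 ∉ tf.map Prod.fst →
      d2.getD q.1 (none, none) = (none, some q.2) := by
    intro q hq hqtf
    have hc : d1.contains q.1 = false := by
      rw [PySem.Dict.contains_eq_decide_mem_keys, hd1keys]
      simpa using hqtf
    have hget2 : d2.get? q.1 = some (none, some q.2) := by
      rw [hd2def, pass2_get? tt h2, hG q hq]
      simp [PySem.Dict.getD_of_not_contains _ _ hc]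
    exact PySem.Dict.getD_of_get?_eq_some _ _ hget2
  -- turn all three append-if loops into filter/map
  rw [PySem.List.foldl_append_if
        (fun e : String × (Option String × Option String) => e.2.1 != e.2.2)
        (fun e => (e.1, if pvFalsy e.2.1 then "new file"
                        else if pvFalsy e.2.2 then "deleted" else "modified")),
      PySem.List.foldl_append_if
        (fun p : String × String =>
          some p.2 != PySem.Dict.get? (PySem.Dict.mk tt) p.1)
        (fun p => (p.1, if p.2 == "" then "new file"
                        else if pvFalsy (PySem.Dict.get? (PySem.Dict.mk tt) p.1) then "deleted"
                        else "modified")),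
      PySem.List.foldl_append_if
        (fun p : String × String => !(PySem.Dict.contains (PySem.Dict.mk tf) p.1))
        (fun p => (p.1, "new file"))]
  simp only [List.nil_append]
  -- items of d2 as a map over its keys, split into the two key blocks
  rw [PySem.Dict.items_eq_map_keys d2 hd2nodup (none, none), hd2keys, List.map_append,
      List.filter_append, List.map_append]
  congr 1
  · -- block 1: keys from tree_from
    rw [List.map_map]
    have hmap : tf.map ((fun k => (k, d2.getD k (none, none))) ∘ Prod.fst)
        = tf.map (fun q => (q.1, ((some q.2 : Option String),
            PySem.Dict.get? (PySem.Dict.mk tt) q.1))) :=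
      List.map_congr_left (fun q hq => by simp [Function.comp, hd2getTF q hq])
    rw [hmap, List.filter_map, List.map_map]
    have hcond : ∀ q : String × String,
        ((fun e : String × (Option String × Option String) => e.2.1 != e.2.2) ∘
          (fun q : String × String => (q.1, ((some q.2 : Option String),
            PySem.Dict.get? (PySem.Dict.mk tt) q.1)))) q
        = (some q.2 != PySem.Dict.get? (PySem.Dict.mk tt) q.1) := fun q => rfl
    rw [List.filter_congr (fun q _ => hcond q)]
    exact List.map_congr_left (fun q hq => by simp [Function.comp, pvFalsy])
  · -- block 2: keys only in tree_to
    rw [List.filter_map, List.map_map, List.filter_filter, List.filter_map, List.map_map]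
    have hfc : List.filter ((fun a =>
          ((fun e : String × (Option String × Option String) => e.2.1 != e.2.2) ∘
            fun k => (k, d2.getD k (none, none))) a
          && (!PySem.Set.contains (tf.map Prod.fst) a)) ∘ Prod.fst) tt
        = List.filter (fun p : String × String => !(PySem.Dict.contains (PySem.Dict.mk tf) p.1)) tt := by
      apply List.filter_congr
      intro q hq
      by_cases hmem : q.1 ∈ tf.map Prod.fst
      · simp [Function.comp, PySem.Set.contains, PySem.Dict.contains_eq_decide_mem_keys,
          PySem.Dict.keys, hmem]
      · simp [Function.comp, PySem.Set.contains, PySem.Dict.contains_eq_decide_mem_keys,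
          PySem.Dict.keys, hmem, hd2getTT q hq hmem]
    rw [hfc]
    apply List.map_congr_left
    intro q hq
    have hq' := List.mem_filter.mp hq
    have hnm : q.1 ∉ tf.map Prod.fst := by
      have := hq'.2
      simp only [PySem.Dict.contains_eq_decide_mem_keys, PySem.Dict.keys, Bool.not_eq_true',
        decide_eq_false_iff_not] at this
      simpa using this
    simp [Function.comp, hd2getTT q hq'.1 hnm, pvFalsy]
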